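-- pv_equiv track=rewrite | github.com/prakashsellathurai/a-grim-loth | python/problems/Divide-arrays.py | solution
-- ===== SOURCE A (Python) =====
-- MAX_N = int(1e5 + 14)
--
-- def solution(a,n):
--     mark = [False] * MAX_N
--     mex = 0
--     pre = []
--     for x in a:
--         mark[x] = True
--         while mark[mex]:
--             mex += 1
--         pre += [mex]
--     mark = [False] * MAX_N
--     mex = 0
--     ans = -1
--     for i in range(n - 1, 0, -1):
--         mark[a[i]] = True
--         while mark[mex]:
--             mex += 1
--         if mex == pre[i - 1]:
--             ans = i
--     return(ans)
-- ===== SOURCE B (Python) =====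
-- MAX_N = int(1e5 + 14)
--
-- def solution(a, n):
--     b = a[:n]
--     m = len(b)
--     # occurrence tables over b; the fixed-size arrays keep A's indexing semantics
--     first = [m] * MAX_N
--     last = [-1] * MAX_N
--     for i in range(m - 1, -1, -1):
--         first[b[i]] = i
--     for i in range(m):
--         last[b[i]] = i
--     # pre[j] = mex(b[:j+1]); for ascending v it equals v exactly on [running max of first, first[v]-1]
--     pre = [0] * m
--     hi = 0
--     v = 0
--     while hi < m:
--         for j in range(hi, first[v]):
--             pre[j] = v
--         hi = max(hi, first[v])
--         v += 1
--     # suf[i] = mex(b[i:]); for ascending v it equals v exactly on [last[v]+1, running min of last]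
--     suf = [0] * m
--     lo = m - 1
--     v = 0
--     while lo >= 0:
--         for i in range(last[v] + 1, lo + 1):
--             suf[i] = v
--         lo = min(lo, last[v])
--         v += 1
--     for i in range(1, n):
--         if suf[i] == pre[i - 1]:
--             return i
--     return -1
-- ===== Notes on version B (the rewrite author's own statement) =====
-- stated objective: alternative
-- what changed: A computes every prefix/suffix mex incrementally with a boolean mark array and an advancing mex pointer inside the element loops; B never advances a mex pointer: it builds first- and last-occurrence index tables of each value, then derives the whole prefix-mex and suffix-mex arrays by filling constant segments per candidate value v (prefix mex equals v exactly between the running max of first occurrences and first[v]-1, dually for suffixes with last occurrences and a running min), and finally scans ascending for the first index where the two tables agree.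
import Mathlib
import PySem

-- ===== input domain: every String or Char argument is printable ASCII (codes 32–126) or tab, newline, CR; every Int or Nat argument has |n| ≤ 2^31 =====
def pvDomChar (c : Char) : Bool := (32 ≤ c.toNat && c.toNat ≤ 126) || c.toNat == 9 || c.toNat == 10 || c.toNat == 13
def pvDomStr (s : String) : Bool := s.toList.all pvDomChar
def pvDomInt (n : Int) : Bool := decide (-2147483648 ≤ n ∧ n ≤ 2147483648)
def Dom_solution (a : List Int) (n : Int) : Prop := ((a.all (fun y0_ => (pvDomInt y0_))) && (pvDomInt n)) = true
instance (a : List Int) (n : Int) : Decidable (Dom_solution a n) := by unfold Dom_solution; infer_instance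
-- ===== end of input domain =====

-- B replaces A's incremental mark-array/mex-pointer passes by first/last-occurrence tables
-- from which the prefix- and suffix-mex arrays are filled segment by segment per value,
-- followed by an ascending first-match scan (objective: alternative algorithm, same cost).

-- ===== PORT A =====
-- Python's `mark = [False]*MAX_N; mark[x] = True` is modelled by a Boolean function on cell
-- indices with Python's negative-index wraparound (exact for -MAX_N ≤ x < MAX_N, which Pre_
-- guarantees; outside that Python raises IndexError).
def pvMarkIdx (x : Int) : Int := if x < 0 then x + 100014 else x

def pvMark (m : Int → Bool) (x : Int) : Int → Bool :=
  fun j => if j = pvMarkIdx x then true else m j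

-- `while mark[mex]: mex += 1`; fuel a.length+1 exceeds the number of marked cells, so the
-- fuel never runs out on the calls the ports make (exact wherever Python's loop terminates
-- without the mark[mex] IndexError, which Pre_ guarantees).
def pvAdv (m : Int → Bool) : Nat → Int → Int
  | 0, mex => mex
  | fuel + 1, mex => if m mex then pvAdv m fuel (mex + 1) else mex

-- A's loop body: `mark[x] = True; while mark[mex]: mex += 1`
def pvStep (fuel : Nat) (s : (Int → Bool) × Int) (x : Int) : (Int → Bool) × Int :=
  (pvMark s.1 x, pvAdv (pvMark s.1 x) fuel s.2)

def solution (a : List Int) (n : Int) : Int :=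
  let fuel := a.length + 1
  -- first loop: prefix pass over all of a, appending each mex to pre
  let pre := (a.foldl
      (fun (s : ((Int → Bool) × Int) × List Int) x =>
        (pvStep fuel s.1 x, s.2 ++ [(pvStep fuel s.1 x).2]))
      (((fun _ => false), 0), [])).2
  -- second loop: descending sweep computing the suffix mex and comparing with pre[i-1]
  ((PySem.List.pyRange (n - 1) 0 (-1)).foldl
    (fun (s : ((Int → Bool) × Int) × Int) i =>
      (pvStep fuel s.1 (PySem.List.pyGetD a i 0),
       if (pvStep fuel s.1 (PySem.List.pyGetD a i 0)).2 = PySem.List.pyGetD pre (i - 1) 0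
       then i else s.2))
    (((fun _ => false), 0), -1)).2

-- ===== PORT B =====
-- Python list write `tbl[x] = v` on a MAX_N-sized table, with negative-index wraparound
def pvUpd (f : Int → Int) (x v : Int) : Int → Int :=
  fun j => if j = pvMarkIdx x then v else f j

-- `while hi < m: for j in range(hi, first[v]): pre[j] = v; hi = max(hi, first[v]); v += 1`
-- (fuel m+1 suffices: the loop runs at most mex(b)+1 ≤ m+1 iterations before hi reaches m)
def pvFillPre (first : Int → Int) (m : Int) : Nat → (Int → Int) → Int → Int → (Int → Int)
  | 0, P, _, _ => P
  | fuel + 1, P, hi, v =>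
    if hi < m then
      pvFillPre first m fuel
        ((PySem.List.pyRange hi (first v) 1).foldl
          (fun P j => fun k => if k = j then v else P k) P)
        (max hi (first v)) (v + 1)
    else P

-- `while lo >= 0: for i in range(last[v]+1, lo+1): suf[i] = v; lo = min(lo, last[v]); v += 1`
def pvFillSuf (last : Int → Int) (m : Int) : Nat → (Int → Int) → Int → Int → (Int → Int)
  | 0, S, _, _ => S
  | fuel + 1, S, lo, v =>
    if 0 ≤ lo then
      pvFillSuf last m fuel
        ((PySem.List.pyRange (last v + 1) (lo + 1) 1).foldl
          (fun S i => fun k => if k = i then v else S k) S)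
        (min lo (last v)) (v + 1)
    else S

-- `for i in range(1, n): if suf[i] == pre[i-1]: return i` / `return -1`
def pvScan2 (pre suf : Int → Int) : List Int → Int
  | [] => -1
  | i :: rest => if suf i = pre (i - 1) then i else pvScan2 pre suf rest

def solution_alt (a : List Int) (n : Int) : Int :=
  let b := PySem.List.slice a none (some n)
  let m : Int := b.length
  let first := (PySem.List.pyRange (m - 1) (-1) (-1)).foldl
      (fun f i => pvUpd f (PySem.List.pyGetD b i 0) i) (fun _ => m)
  let last := (PySem.List.pyRange 0 m 1).foldl
      (fun f i => pvUpd f (PySem.List.pyGetD b i 0) i) (fun _ => -1)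
  let pre := pvFillPre first m (b.length + 1) (fun _ => 0) 0 0
  let suf := pvFillSuf last m (b.length + 1) (fun _ => 0) (m - 1) 0
  pvScan2 pre suf (PySem.List.pyRange 1 n 1)

-- ===== PRECONDITION & SPEC =====
-- Pre_ excludes exactly the inputs where Python A raises IndexError: an element outside
-- [-MAX_N, MAX_N) (at mark[x] / mark[a[i]]), an n ≥ 2 exceeding len(a) (at a[i]), and lists
-- whose elements mark all 100014 cells (at mark[mex]); A returns on every other input.
def Pre_solution (a : List Int) (n : Int) : Prop :=
  (∀ x ∈ a, -100014 ≤ x ∧ x < 100014) ∧ (n ≤ a.length ∨ n ≤ 1) ∧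
    (a.map pvMarkIdx).dedup.length < 100014

instance (a : List Int) (n : Int) : Decidable (Pre_solution a n) := by
  unfold Pre_solution; infer_instance

def pvWitness_solution : List Int × Int := ([0, 1, 0, 2], 4)

def Spec_solution (a : List Int) (n : Int) (out : Int) : Prop := out = solution_alt a n
instance (a : List Int) (n : Int) (out : Int) : Decidable (Spec_solution a n out) := by
  unfold Spec_solution; infer_instance

-- ===== CLAIM (what is proved, stated in full; the proofs are below) =====
def Claim_equal_solution : Prop := ∀ (a : List Int) (n : Int), Dom_solution a n → Pre_solution a n → Spec_solution a n (solution a n)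

-- ===== LEMMAS AND PROOFS =====

-- marked cells of a processed list, and the mathematical mex of a cell list
def pvCells (p : List Int) : List Int := p.map pvMarkIdx

def pvMarkSet (p : List Int) : Int → Bool := fun j => decide (j ∈ pvCells p)

theorem pvMex_ex (s : List Int) : ∃ k : Nat, ((k : Int) ∉ s) := by
  classical
  by_contra h
  push Not at h
  exact (Set.infinite_of_injective_forall_mem (s := {x : Int | x ∈ s})
      (f := fun k : Nat => (k : Int))
      (fun a b hab => Nat.cast_injective hab) (fun k => h k)) (s.finite_toSet)

def pvMex (s : List Int) : Int := ((Nat.find (pvMex_ex s) : Nat) : Int)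

theorem pvMex_nonneg (s : List Int) : 0 ≤ pvMex s := by
  unfold pvMex; positivity

theorem pvMex_not_mem (s : List Int) : pvMex s ∉ s := Nat.find_spec (pvMex_ex s)

theorem pvMex_mem_of_lt (s : List Int) {j : Int} (h0 : 0 ≤ j) (h : j < pvMex s) : j ∈ s := by
  have hj : j = ((j.toNat : Nat) : Int) := by omega
  rw [hj]; by_contra hmem
  have hle : Nat.find (pvMex_ex s) ≤ j.toNat := Nat.find_le hmem
  unfold pvMex at h; omega

theorem pvMex_eq (s : List Int) {v : Int} (h0 : 0 ≤ v) (hv : v ∉ s)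
    (hall : ∀ j : Int, 0 ≤ j → j < v → j ∈ s) : pvMex s = v := by
  have hv' : ((v.toNat : Nat) : Int) ∉ s := by rwa [show ((v.toNat : Nat) : Int) = v from by omega]
  have h1 : Nat.find (pvMex_ex s) ≤ v.toNat := Nat.find_le hv'
  have h1' : pvMex s ≤ v := by unfold pvMex; omega
  rcases lt_or_eq_of_le h1' with h2 | h2
  · exact absurd (hall _ (pvMex_nonneg s) h2) (pvMex_not_mem s)
  · exact h2

theorem pvMex_congr {s t : List Int} (h : ∀ j, j ∈ s ↔ j ∈ t) : pvMex s = pvMex t :=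
  pvMex_eq s (pvMex_nonneg t) (fun hc => pvMex_not_mem t ((h _).mp hc))
    (fun j hj hlt => (h j).mpr (pvMex_mem_of_lt t hj hlt))

theorem pvMex_le_length (s : List Int) : pvMex s ≤ (s.length : Int) := by
  classical
  have hsub : Finset.image (fun k : Nat => (k : Int)) (Finset.range (Nat.find (pvMex_ex s)))
      ⊆ s.toFinset := by
    intro x hx
    simp only [Finset.mem_image, Finset.mem_range] at hx
    obtain ⟨k, hk, rfl⟩ := hx
    exact List.mem_toFinset.mpr (pvMex_mem_of_lt s (by positivity) (by unfold pvMex; omega))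
  have h1 := Finset.card_le_card hsub
  rw [Finset.card_image_of_injective _ (fun a b hab => Nat.cast_injective hab),
    Finset.card_range] at h1
  have h2 := s.toFinset_card_le
  unfold pvMex; omega

theorem pvMex_mono {s t : List Int} (h : ∀ j, j ∈ s → j ∈ t) : pvMex s ≤ pvMex t := by
  by_contra hc
  push Not at hc
  exact pvMex_not_mem t (h _ (pvMex_mem_of_lt s (pvMex_nonneg t) hc))

-- ----- A-side characterisation -----

theorem adv_eq (mk : Int → Bool) :
    ∀ (fuel : Nat) (c L : Int), c ≤ L → mk L = false →
      (∀ j, c ≤ j → j < L → mk j = true) → L - c ≤ (fuel : Int) →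
      pvAdv mk fuel c = L := by
  intro fuel
  induction fuel with
  | zero =>
    intro c L h1 h2 h3 h4
    have hc : c = L := by omega
    simp [pvAdv, hc]
  | succ f ih =>
    intro c L h1 h2 h3 h4
    by_cases hc : c = L
    · subst hc
      simp [pvAdv, h2]
    · have hlt : c < L := lt_of_le_of_ne h1 hc
      have hm : mk c = true := h3 c le_rfl hlt
      simp only [pvAdv, hm, if_true]
      exact ih (c + 1) L (by omega) h2 (fun j hj hjL => h3 j (by omega) hjL) (by omega)

theorem step_eq (fuel : Nat) (p : List Int) (x : Int)
    (h : pvMex (pvCells (p ++ [x])) ≤ (fuel : Int)) :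
    pvStep fuel (pvMarkSet p, pvMex (pvCells p)) x
      = (pvMarkSet (p ++ [x]), pvMex (pvCells (p ++ [x]))) := by
  unfold pvStep
  have hmark : pvMark (pvMarkSet p) x = pvMarkSet (p ++ [x]) := by
    funext j
    by_cases hj : j = pvMarkIdx x <;> simp [pvMark, pvMarkSet, pvCells, hj]
  rw [hmark]
  refine Prod.ext rfl ?_
  show pvAdv (pvMarkSet (p ++ [x])) fuel (pvMex (pvCells p)) = pvMex (pvCells (p ++ [x]))
  apply adv_eq
  · exact pvMex_mono (fun j hj => by
      simp only [pvCells, List.map_append] at hj ⊢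
      exact List.mem_append_left _ hj)
  · simp only [pvMarkSet, decide_eq_false_iff_not]
    exact pvMex_not_mem _
  · intro j hj hjL
    simp only [pvMarkSet, decide_eq_true_eq]
    exact pvMex_mem_of_lt _ (le_trans (pvMex_nonneg _) hj) hjL
  · have := pvMex_nonneg (pvCells p)
    omega

theorem foldA (fuel : Nat) :
    ∀ (p : List Int), (p.length : Int) ≤ (fuel : Int) →
      List.foldl (pvStep fuel) ((fun _ => false), 0) p = (pvMarkSet p, pvMex (pvCells p)) := by
  intro p
  induction p using List.reverseRecOn with
  | nil =>
    intro _
    refine Prod.ext ?_ ?_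
    · funext j; simp [pvMarkSet, pvCells]
    · show (0 : Int) = pvMex (pvCells [])
      exact (pvMex_eq _ le_rfl (by simp [pvCells]) (fun j hj hlt => by omega)).symm
  | append_singleton q x ih =>
    intro h
    rw [List.foldl_append, ih (by simp at h ⊢; omega)]
    simp only [List.foldl_cons, List.foldl_nil]
    apply step_eq
    calc pvMex (pvCells (q ++ [x])) ≤ ((pvCells (q ++ [x])).length : Int) := pvMex_le_length _
      _ = (((q ++ [x]).length : Nat) : Int) := by simp [pvCells]
      _ ≤ (fuel : Int) := h

-- A's first loop: the appended list is the list of prefix states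
theorem pass1_eq (fuel : Nat) :
    ∀ (a : List Int) (s0 : (Int → Bool) × Int) (l0 : List Int),
      a.foldl (fun (s : ((Int → Bool) × Int) × List Int) x =>
          (pvStep fuel s.1 x, s.2 ++ [(pvStep fuel s.1 x).2])) (s0, l0)
      = (a.foldl (pvStep fuel) s0,
         l0 ++ (List.range a.length).map
            (fun k => ((a.take (k + 1)).foldl (pvStep fuel) s0).2)) := by
  intro a
  induction a with
  | nil => intro s0 l0; simp
  | cons x t ih =>
    intro s0 l0
    simp only [List.foldl_cons, ih, List.length_cons, List.range_succ_eq_map,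
      List.map_cons, List.map_map, List.take_succ_cons, List.append_assoc,
      List.singleton_append]
    simp [List.take_zero]

-- the (index, mex-after-processing-index) trace of A's second loop
def pvTrace (fuel : Nat) (g : Int → Int) : List Int → ((Int → Bool) × Int) → List (Int × Int)
  | [], _ => []
  | i :: rest, s =>
    (i, (pvStep fuel s (g i)).2) :: pvTrace fuel g rest (pvStep fuel s (g i))

-- A's second loop: state evolves by pvStep, answer is the fold over the trace
theorem pass2_eq (fuel : Nat) (g v : Int → Int) :
    ∀ (L : List Int) (s0 : (Int → Bool) × Int) (ans0 : Int),
      L.foldl (fun (s : ((Int → Bool) × Int) × Int) i =>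
          (pvStep fuel s.1 (g i),
           if (pvStep fuel s.1 (g i)).2 = v i then i else s.2)) (s0, ans0)
      = (L.foldl (fun s i => pvStep fuel s (g i)) s0,
         (pvTrace fuel g L s0).foldl
           (fun ans p => if p.2 = v p.1 then p.1 else ans) ans0) := by
  intro L
  induction L with
  | nil => intro s0 ans0; simp [pvTrace]
  | cons i t ih => intro s0 ans0; simp only [List.foldl_cons, pvTrace, ih]

-- keep-last-match fold = first match of the reversed list
theorem lastmatch_eq (v : Int → Int) :
    ∀ (l : List (Int × Int)) (d : Int),
      l.foldl (fun ans p => if p.2 = v p.1 then p.1 else ans) d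
      = (((l.reverse.find? (fun p => decide (p.2 = v p.1))).map (fun p => p.1)).getD d) := by
  intro l
  induction l with
  | nil => intro d; simp
  | cons p t ih =>
    intro d
    simp only [List.foldl_cons, List.reverse_cons, ih, List.find?_append]
    rcases hf : t.reverse.find? (fun p => decide (p.2 = v p.1)) with _ | val
    · by_cases hq : p.2 = v p.1 <;> simp [hf, hq]
    · simp [hf]

-- trace of a descending range sweep, closed form
theorem trace_desc (fuel : Nat) (g : Int → Int) :
    ∀ (m : Nat) (b : Int) (s : (Int → Bool) × Int),
      pvTrace fuel g (PySem.List.pyRange (b + m) b (-1)) s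
      = (PySem.List.pyRange (b + m) b (-1)).map
          (fun i => (i, (((PySem.List.pyRange (b + m) (i - 1) (-1)).map g).foldl
                           (pvStep fuel) s).2)) := by
  intro m
  induction m with
  | zero =>
    intro b s
    rw [show b + ((0:Nat):Int) = b from by push_cast; ring,
      PySem.List.pyRange_neg_one_eq_nil (le_refl b)]
    simp [pvTrace]
  | succ m ih =>
    intro b s
    push_cast
    rw [PySem.List.pyRange_neg_one_cons (show b < b + ((m:Int)+1) by omega)]
    simp only [pvTrace, List.map_cons]
    rw [show b + ((m:Int)+1) - 1 = b + m from by ring]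
    rw [ih b (pvStep fuel s (g (b + ((m:Int)+1))))]
    congr 1
    · rw [PySem.List.pyRange_neg_one_cons (show b + (m:Int) < b + ((m:Int)+1) by omega),
        PySem.List.pyRange_neg_one_eq_nil (show b + ((m:Int)+1) - 1 ≤ b + (m:Int) by omega)]
      simp
    · apply List.map_congr_left
      intro i hi
      have hb := (PySem.List.mem_pyRange_neg_one.mp hi)
      rw [PySem.List.pyRange_neg_one_cons (show i - 1 < b + ((m:Int)+1) by omega)]
      rw [show b + ((m:Int)+1) - 1 = b + m from by ring]
      simp [List.foldl_cons]

theorem trace_desc_int (fuel : Nat) (g : Int → Int) (t b : Int) (h : b ≤ t)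
    (s : (Int → Bool) × Int) :
    pvTrace fuel g (PySem.List.pyRange t b (-1)) s
    = (PySem.List.pyRange t b (-1)).map
        (fun i => (i, (((PySem.List.pyRange t (i - 1) (-1)).map g).foldl (pvStep fuel) s).2)) := by
  rw [show t = b + ((t - b).toNat : Int) from by omega]
  exact trace_desc fuel g (t - b).toNat b s

theorem find?_congr' {α : Type} :
    ∀ (l : List α) (p q : α → Bool), (∀ x ∈ l, p x = q x) → l.find? p = l.find? q := by
  intro l
  induction l with
  | nil => intro p q h; rfl
  | cons x t ih =>
    intro p q h
    have hx := h x (List.mem_cons_self ..)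
    simp only [List.find?_cons, hx]
    split
    · rfl
    · exact ih p q (fun y hy => h y (List.mem_cons_of_mem _ hy))

-- the ascending index range maps through pyGetD onto a drop of a take
theorem map_getD_range_seg (a : List Int) (i n : Int) (h0 : 0 ≤ i) (hn : i ≤ n)
    (hlen : n ≤ (a.length : Int)) :
    (PySem.List.pyRange i n 1).map (fun j => PySem.List.pyGetD a j 0)
      = (a.take n.toNat).drop i.toNat := by
  have hlen : (((a.take n.toNat).length : Nat) : Int) = n := by simp; omega
  have hcong : (PySem.List.pyRange i n 1).map (fun j => PySem.List.pyGetD a j 0)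
      = (PySem.List.pyRange i n 1).map (fun j => PySem.List.pyGetD (a.take n.toNat) j 0) := by
    apply List.map_congr_left
    intro j hj
    obtain ⟨h1, h2⟩ := PySem.List.mem_pyRange_one.mp hj
    rw [PySem.List.pyGetD_eq_getElem a 0 (by omega) (by omega),
      PySem.List.pyGetD_eq_getElem (a.take n.toNat) 0 (by omega) (by rw [hlen]; omega),
      List.getElem_take]
  have hmain := PySem.List.map_pyGetD_pyRange' (a.take n.toNat) 0 h0
  rw [hlen] at hmain
  rw [hcong, hmain]

-- ----- B-side characterisation -----

-- value of an overwrite fold: the last write wins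
theorem fold_upd_last (g : Int → Int) :
    ∀ (L : List Int) (f : Int → Int) (w : Int),
      (L.foldl (fun f i => pvUpd f (g i) i) f) w
      = ((L.reverse.find? (fun i => decide (pvMarkIdx (g i) = w))).getD (f w)) := by
  intro L
  induction L with
  | nil => intro f w; simp
  | cons i t ih =>
    intro f w
    simp only [List.foldl_cons, List.reverse_cons, ih, List.find?_append]
    rcases hf : t.reverse.find? (fun i => decide (pvMarkIdx (g i) = w)) with _ | val
    · by_cases hw : pvMarkIdx (g i) = w
      · simp [hw, pvUpd]
      · have hw' : ¬ (w = pvMarkIdx (g i)) := fun h => hw h.symm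
        simp [hw, hw', pvUpd]
    · simp

-- pointwise description of one segment fill
theorem fill_seg_aux (v : Int) :
    ∀ (len : Nat) (lo : Int) (P : Int → Int) (k : Int),
      ((PySem.List.pyRange lo (lo + len) 1).foldl
          (fun P j => fun k => if k = j then v else P k) P) k
        = if lo ≤ k ∧ k < lo + len then v else P k := by
  intro len
  induction len with
  | zero =>
    intro lo P k
    rw [show lo + ((0:Nat):Int) = lo from by push_cast; ring,
      PySem.List.pyRange_one_eq_nil (le_refl lo)]
    simp only [List.foldl_nil]
    rw [if_neg (by omega)]
  | succ f ih =>
    intro lo P k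
    rw [show lo + ((f+1:Nat):Int) = (lo + 1) + ((f:Nat):Int) from by push_cast; ring]
    rw [PySem.List.pyRange_one_cons (by omega)]
    simp only [List.foldl_cons]
    rw [ih (lo+1)]
    by_cases h1 : lo + 1 ≤ k ∧ k < lo + 1 + ((f:Nat):Int)
    · rw [if_pos h1, if_pos (by omega)]
    · rw [if_neg h1]
      by_cases hk : k = lo
      · rw [if_pos (show lo ≤ k ∧ k < lo + 1 + ((f:Nat):Int) by omega)]
        simp [hk]
      · rw [if_neg (show ¬(lo ≤ k ∧ k < lo + 1 + ((f:Nat):Int)) by omega)]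
        simp [hk]

theorem fill_seg (v lo hi : Int) (P : Int → Int) (k : Int) :
    ((PySem.List.pyRange lo hi 1).foldl (fun P j => fun k => if k = j then v else P k) P) k
      = if lo ≤ k ∧ k < hi then v else P k := by
  rcases le_or_gt lo hi with hle | hlt
  · have h := fill_seg_aux v (hi - lo).toNat lo P k
    rw [show lo + (((hi - lo).toNat : Nat) : Int) = hi from by omega] at h
    exact h
  · rw [PySem.List.pyRange_one_eq_nil (le_of_lt hlt)]
    simp only [List.foldl_nil]
    rw [if_neg (by omega)]

-- first-match search over an ascending index range: bounds, hit, and minimality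
theorem find_asc_spec (p : Int → Bool) :
    ∀ (len : Nat) (lo : Int),
      lo ≤ ((PySem.List.pyRange lo (lo + len) 1).find? p).getD (lo + len)
      ∧ ((PySem.List.pyRange lo (lo + len) 1).find? p).getD (lo + len) ≤ lo + len
      ∧ (((PySem.List.pyRange lo (lo + len) 1).find? p).getD (lo + len) < lo + len →
          p (((PySem.List.pyRange lo (lo + len) 1).find? p).getD (lo + len)) = true)
      ∧ ∀ j, lo ≤ j → j < ((PySem.List.pyRange lo (lo + len) 1).find? p).getD (lo + len) →
          p j = false := by
  intro len
  induction len with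
  | zero =>
    intro lo
    rw [show lo + ((0:Nat):Int) = lo from by push_cast; ring,
      PySem.List.pyRange_one_eq_nil (le_refl lo)]
    simp only [List.find?_nil, Option.getD_none]
    exact ⟨le_refl lo, le_refl lo, fun h => absurd h (by omega), fun j h1 h2 => by omega⟩
  | succ f ih =>
    intro lo
    rw [show lo + ((f+1:Nat):Int) = (lo + 1) + ((f:Nat):Int) from by push_cast; ring]
    rw [PySem.List.pyRange_one_cons (by omega)]
    cases hp : p lo
    · rw [List.find?_cons_of_neg (by simp [hp])]
      obtain ⟨h1, h2, h3, h4⟩ := ih (lo + 1)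
      refine ⟨by omega, h2, h3, fun j hj1 hj2 => ?_⟩
      by_cases hjlo : j = lo
      · rw [hjlo]; exact hp
      · exact h4 j (by omega) hj2
    · rw [List.find?_cons_of_pos (by simp [hp])]
      simp only [Option.getD_some]
      exact ⟨le_refl lo, by omega, fun _ => hp, fun j h1 h2 => by omega⟩

-- first-match search over a descending index range: bounds, hit, and maximality
theorem find_desc_spec (p : Int → Bool) :
    ∀ (len : Nat) (b : Int),
      b ≤ ((PySem.List.pyRange (b + len) b (-1)).find? p).getD b
      ∧ ((PySem.List.pyRange (b + len) b (-1)).find? p).getD b ≤ b + len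
      ∧ (b < ((PySem.List.pyRange (b + len) b (-1)).find? p).getD b →
          p (((PySem.List.pyRange (b + len) b (-1)).find? p).getD b) = true)
      ∧ ∀ j, ((PySem.List.pyRange (b + len) b (-1)).find? p).getD b < j → j ≤ b + len →
          p j = false := by
  intro len
  induction len with
  | zero =>
    intro b
    rw [show b + ((0:Nat):Int) = b from by push_cast; ring,
      PySem.List.pyRange_neg_one_eq_nil (le_refl b)]
    simp only [List.find?_nil, Option.getD_none]
    exact ⟨le_refl b, le_refl b, fun h => absurd h (by omega), fun j h1 h2 => by omega⟩
  | succ f ih =>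
    intro b
    have hstep : b + ((f+1:Nat):Int) = (b + ((f:Nat):Int)) + 1 := by push_cast; ring
    rw [hstep, PySem.List.pyRange_neg_one_cons (by omega),
      show b + ((f:Nat):Int) + 1 - 1 = b + ((f:Nat):Int) from by ring]
    cases hp : p (b + ((f:Nat):Int) + 1)
    · rw [List.find?_cons_of_neg (by simp [hp])]
      obtain ⟨h1, h2, h3, h4⟩ := ih b
      refine ⟨h1, by omega, h3, fun j hj1 hj2 => ?_⟩
      by_cases hjtop : j = b + ((f:Nat):Int) + 1
      · rw [hjtop]; exact hp
      · exact h4 j hj1 (by omega)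
    · rw [List.find?_cons_of_pos (by simp [hp])]
      simp only [Option.getD_some]
      exact ⟨by omega, by omega, fun _ => hp, fun j h1 h2 => by omega⟩

-- index characterisation of membership in a take / drop of the cell list
theorem mem_cells_take (b : List Int) (t : Nat) (u : Int) :
    u ∈ pvCells (b.take t) ↔ ∃ i : Nat, i < t ∧ ∃ hlen : i < b.length, pvMarkIdx (b[i]'hlen) = u := by
  constructor
  · intro h
    obtain ⟨x, hx, rfl⟩ := List.mem_map.mp h
    obtain ⟨i, hi, rfl⟩ := List.getElem_of_mem hx
    have hlen : i < min t b.length := by simpa using hi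
    refine ⟨i, by omega, by omega, ?_⟩
    rw [List.getElem_take]
  · rintro ⟨i, h1, h2, h3⟩
    refine List.mem_map.mpr ⟨b[i]'h2, ?_, h3⟩
    have : (b.take t)[i]'(by simp; omega) = b[i]'h2 := List.getElem_take
    exact this ▸ List.getElem_mem _

theorem mem_cells_drop (b : List Int) (t : Nat) (u : Int) :
    u ∈ pvCells (b.drop t) ↔ ∃ i : Nat, t ≤ i ∧ ∃ hlen : i < b.length, pvMarkIdx (b[i]'hlen) = u := by
  constructor
  · intro h
    obtain ⟨x, hx, rfl⟩ := List.mem_map.mp h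
    obtain ⟨i, hi, rfl⟩ := List.getElem_of_mem hx
    have hlen : i < b.length - t := by simpa using hi
    refine ⟨t + i, by omega, by omega, ?_⟩
    rw [List.getElem_drop]
  · rintro ⟨i, h1, h2, h3⟩
    refine List.mem_map.mpr ⟨b[i]'h2, ?_, h3⟩
    have : (b.drop t)[i - t]'(by simp; omega) = b[i]'h2 := by
      rw [List.getElem_drop]
      congr 1
      omega
    exact this ▸ List.getElem_mem _

-- the filled prefix-mex array is correct, given the first-occurrence table's spec
theorem fillPre_correct (b : List Int) (F : Int → Int) (m : Int) (hm : m = (b.length : Int))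
    (HF : ∀ u : Int, 0 ≤ u → ∀ t : Nat, (t : Int) ≤ m →
      ((u ∈ pvCells (b.take t)) ↔ F u < (t : Int)))
    (HFm : ∀ u : Int, 0 ≤ u → F u ≤ m) :
    ∀ (fuel : Nat) (P : Int → Int) (hi v : Int), 0 ≤ hi → hi ≤ m → 0 ≤ v →
      (∀ u : Int, 0 ≤ u → u < v → F u ≤ hi) →
      (∀ j : Int, 0 ≤ j → j < hi → P j = pvMex (pvCells (b.take (j + 1).toNat))) →
      (pvMex (pvCells b) - v + 1 ≤ (fuel : Int)) →
      ∀ j : Int, 0 ≤ j → j < m →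
        (pvFillPre F m fuel P hi v) j = pvMex (pvCells (b.take (j + 1).toNat)) := by
  intro fuel
  induction fuel with
  | zero =>
    intro P hi v h0hi hhim h0v hInv1 hInv3 hfuel j hj0 hjm
    have hvb : pvMex (pvCells b) < v := by omega
    have hFm : m ≤ F (pvMex (pvCells b)) := by
      by_contra hc
      push Not at hc
      have hmem : pvMex (pvCells b) ∈ pvCells (b.take b.length) := by
        refine (HF _ (pvMex_nonneg _) b.length (by omega)).mpr ?_
        omega
      rw [List.take_length] at hmem
      exact pvMex_not_mem _ hmem
    have hhi : m ≤ hi := le_trans hFm (hInv1 _ (pvMex_nonneg _) hvb)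
    exact hInv3 j hj0 (by omega)
  | succ f ih =>
    intro P hi v h0hi hhim h0v hInv1 hInv3 hfuel j hj0 hjm
    by_cases hcond : hi < m
    · simp only [pvFillPre, if_pos hcond]
      apply ih _ (max hi (F v)) (v + 1) (by omega) (max_le hhim (HFm v h0v)) (by omega)
      · intro u h0u huv
        rcases lt_or_eq_of_le (show u ≤ v by omega) with h | h
        · exact le_trans (hInv1 u h0u h) (le_max_left _ _)
        · rw [h]; exact le_max_right _ _
      · intro k hk0 hklt
        rw [fill_seg]
        by_cases hseg : hi ≤ k ∧ k < F v
        · rw [if_pos hseg]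
          have hkm : k + 1 ≤ m := by
            have := HFm v h0v
            omega
          have hcast : (((k + 1).toNat : Nat) : Int) = k + 1 := by omega
          refine (pvMex_eq _ h0v ?_ ?_).symm
          · intro hmem
            have := (HF v h0v (k + 1).toNat (by omega)).mp hmem
            omega
          · intro u h0u huv
            refine (HF u h0u (k + 1).toNat (by omega)).mpr ?_
            have := hInv1 u h0u huv
            omega
        · rw [if_neg hseg]
          exact hInv3 k hk0 (by omega)
      · omega
      · exact hj0
      · exact hjm
    · simp only [pvFillPre, if_neg hcond]
      exact hInv3 j hj0 (by omega)

-- the filled suffix-mex array is correct, given the last-occurrence table's spec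
theorem fillSuf_correct (b : List Int) (G : Int → Int) (m : Int)
    (HG : ∀ u : Int, 0 ≤ u → ∀ t : Nat, ((u ∈ pvCells (b.drop t)) ↔ (t : Int) ≤ G u))
    (HG0 : ∀ u : Int, 0 ≤ u → -1 ≤ G u) :
    ∀ (fuel : Nat) (S : Int → Int) (lo v : Int), -1 ≤ lo → lo ≤ m - 1 → 0 ≤ v →
      (∀ u : Int, 0 ≤ u → u < v → lo ≤ G u) →
      (∀ i : Int, lo < i → i < m → S i = pvMex (pvCells (b.drop i.toNat))) →
      (pvMex (pvCells b) - v + 1 ≤ (fuel : Int)) →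
      ∀ i : Int, 0 ≤ i → i < m →
        (pvFillSuf G m fuel S lo v) i = pvMex (pvCells (b.drop i.toNat)) := by
  intro fuel
  induction fuel with
  | zero =>
    intro S lo v h0lo hlom h0v hInv1 hInv3 hfuel i hi0 him
    have hvb : pvMex (pvCells b) < v := by omega
    have hGm : G (pvMex (pvCells b)) ≤ -1 := by
      by_contra hc
      push Not at hc
      have hmem : pvMex (pvCells b) ∈ pvCells (b.drop 0) := by
        refine (HG _ (pvMex_nonneg _) 0).mpr ?_
        omega
      rw [List.drop_zero] at hmem
      exact pvMex_not_mem _ hmem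
    have hlo : lo ≤ -1 := le_trans (hInv1 _ (pvMex_nonneg _) hvb) hGm
    exact hInv3 i (by omega) him
  | succ f ih =>
    intro S lo v h0lo hlom h0v hInv1 hInv3 hfuel i hi0 him
    by_cases hcond : 0 ≤ lo
    · simp only [pvFillSuf, if_pos hcond]
      have hGv0 : -1 ≤ G v := HG0 v h0v
      apply ih _ (min lo (G v)) (v + 1) (by omega)
        (le_trans (min_le_left _ _) hlom) (by omega)
      · intro u h0u huv
        rcases lt_or_eq_of_le (show u ≤ v by omega) with h | h
        · exact le_trans (min_le_left _ _) (hInv1 u h0u h)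
        · rw [h]; exact min_le_right _ _
      · intro k hklt hkm
        rw [fill_seg]
        by_cases hseg : G v + 1 ≤ k ∧ k < lo + 1
        · rw [if_pos hseg]
          have hk0 : 0 ≤ k := by omega
          have hcast : ((k.toNat : Nat) : Int) = k := by omega
          refine (pvMex_eq _ h0v ?_ ?_).symm
          · intro hmem
            have := (HG v h0v k.toNat).mp hmem
            omega
          · intro u h0u huv
            refine (HG u h0u k.toNat).mpr ?_
            have := hInv1 u h0u huv
            omega
        · rw [if_neg hseg]
          exact hInv3 k (by omega) hkm
      · omega
      · exact hi0
      · exact him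
    · simp only [pvFillSuf, if_neg hcond]
      exact hInv3 i (by omega) him

-- B's final scan is a first-match search
theorem scan2_eq (pre suf : Int → Int) :
    ∀ L : List Int,
      pvScan2 pre suf L
      = ((L.find? (fun i => decide (suf i = pre (i - 1)))).getD (-1)) := by
  intro L
  induction L with
  | nil => simp [pvScan2]
  | cons i t ih =>
    by_cases h : suf i = pre (i - 1)
    · simp [pvScan2, h]
    · simp [pvScan2, h, ih]

-- the first-occurrence table satisfies its spec
theorem first_spec (b : List Int) (m : Int) (hm : m = (b.length : Int)) :
    ∀ u : Int, 0 ≤ u →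
      (0 ≤ ((PySem.List.pyRange (m - 1) (-1) (-1)).foldl
          (fun f i => pvUpd f (PySem.List.pyGetD b i 0) i) (fun _ => m)) u
        ∧ ((PySem.List.pyRange (m - 1) (-1) (-1)).foldl
          (fun f i => pvUpd f (PySem.List.pyGetD b i 0) i) (fun _ => m)) u ≤ m
        ∧ ∀ t : Nat, (t : Int) ≤ m →
          ((u ∈ pvCells (b.take t)) ↔
            ((PySem.List.pyRange (m - 1) (-1) (-1)).foldl
              (fun f i => pvUpd f (PySem.List.pyGetD b i 0) i) (fun _ => m)) u < (t : Int))) := by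
  intro u hu
  have hm0 : 0 ≤ m := by rw [hm]; positivity
  have hrev : (PySem.List.pyRange (m - 1) (-1) (-1)).reverse = PySem.List.pyRange 0 m 1 := by
    rw [PySem.List.pyRange_neg_one_eq_reverse, List.reverse_reverse,
      show (-1:Int) + 1 = 0 from by ring, show m - 1 + 1 = m from by ring]
  have hF := fold_upd_last (fun i => PySem.List.pyGetD b i 0)
      (PySem.List.pyRange (m - 1) (-1) (-1)) (fun _ => m) u
  rw [hrev] at hF
  have hcast : (0 : Int) + ((m.toNat : Nat) : Int) = m := by omega
  obtain ⟨h1, h2, h3, h4⟩ :=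
    find_asc_spec (fun i => decide (pvMarkIdx (PySem.List.pyGetD b i 0) = u)) m.toNat 0
  rw [hcast] at h1 h2 h3 h4
  rw [hF]
  refine ⟨h1, h2, fun t ht => ?_⟩
  rw [hF] at *
  constructor
  · intro hmem
    obtain ⟨i, hit, hlen, hwrap⟩ := (mem_cells_take b t u).mp hmem
    have hgd : PySem.List.pyGetD b (i : Int) 0 = b[i]'hlen := by
      rw [PySem.List.pyGetD_natCast, List.getD_eq_getElem _ _ hlen]
    by_contra hc
    have hfalse := h4 (i : Int) (by positivity) (by omega)
    rw [hgd] at hfalse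
    simp [hwrap] at hfalse
  · intro hRt
    set R := ((PySem.List.pyRange 0 m 1).find?
        (fun i => decide (pvMarkIdx (PySem.List.pyGetD b i 0) = u))).getD m with hR
    have hRm : R < m := by rw [hm] at ht ⊢; omega
    have hp := h3 hRm
    simp only [decide_eq_true_eq] at hp
    have hlen : R.toNat < b.length := by omega
    have hgd : PySem.List.pyGetD b R 0 = b[R.toNat]'hlen := by
      rw [PySem.List.pyGetD_eq_getElem b 0 h1 (by omega)]
    rw [hgd] at hp
    exact (mem_cells_take b t u).mpr ⟨R.toNat, by omega, hlen, hp⟩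

-- the last-occurrence table satisfies its spec
theorem last_spec (b : List Int) (m : Int) (hm : m = (b.length : Int)) :
    ∀ u : Int, 0 ≤ u →
      (-1 ≤ ((PySem.List.pyRange 0 m 1).foldl
          (fun f i => pvUpd f (PySem.List.pyGetD b i 0) i) (fun _ => -1)) u
        ∧ ((PySem.List.pyRange 0 m 1).foldl
          (fun f i => pvUpd f (PySem.List.pyGetD b i 0) i) (fun _ => -1)) u ≤ m - 1
        ∧ ∀ t : Nat,
          ((u ∈ pvCells (b.drop t)) ↔
            (t : Int) ≤ ((PySem.List.pyRange 0 m 1).foldl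
              (fun f i => pvUpd f (PySem.List.pyGetD b i 0) i) (fun _ => -1)) u)) := by
  intro u hu
  have hm0 : 0 ≤ m := by rw [hm]; positivity
  have hrev : (PySem.List.pyRange 0 m 1).reverse = PySem.List.pyRange (m - 1) (-1) (-1) := by
    rw [PySem.List.pyRange_neg_one_eq_reverse,
      show (-1:Int) + 1 = 0 from by ring, show m - 1 + 1 = m from by ring]
  have hG := fold_upd_last (fun i => PySem.List.pyGetD b i 0)
      (PySem.List.pyRange 0 m 1) (fun _ => -1) u
  rw [hrev] at hG
  have hcast : (-1 : Int) + ((m.toNat : Nat) : Int) = m - 1 := by omega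
  obtain ⟨h1, h2, h3, h4⟩ :=
    find_desc_spec (fun i => decide (pvMarkIdx (PySem.List.pyGetD b i 0) = u)) m.toNat (-1)
  rw [hcast] at h1 h2 h3 h4
  rw [hG]
  refine ⟨h1, h2, fun t => ?_⟩
  rw [hG] at *
  constructor
  · intro hmem
    obtain ⟨i, hit, hlen, hwrap⟩ := (mem_cells_drop b t u).mp hmem
    have hgd : PySem.List.pyGetD b (i : Int) 0 = b[i]'hlen := by
      rw [PySem.List.pyGetD_natCast, List.getD_eq_getElem _ _ hlen]
    by_contra hc
    have hfalse := h4 (i : Int) (by omega) (by rw [hm] at *; omega)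
    rw [hgd] at hfalse
    simp [hwrap] at hfalse
  · intro hRt
    set R := ((PySem.List.pyRange (m - 1) (-1) (-1)).find?
        (fun i => decide (pvMarkIdx (PySem.List.pyGetD b i 0) = u))).getD (-1) with hR
    have hp := h3 (by omega)
    simp only [decide_eq_true_eq] at hp
    have hlen : R.toNat < b.length := by rw [hm] at h2; omega
    have hgd : PySem.List.pyGetD b R 0 = b[R.toNat]'hlen := by
      rw [PySem.List.pyGetD_eq_getElem b 0 (by omega) (by rw [hm] at h2; omega)]
    rw [hgd] at hp
    exact (mem_cells_drop b t u).mpr ⟨R.toNat, by omega, hlen, hp⟩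

-- ----- main equivalence -----

theorem solution_main (a : List Int) (n : Int) (hPre : Pre_solution a n) :
    solution a n = solution_alt a n := by
  obtain ⟨hrange, hnbound, hdedup⟩ := hPre
  unfold solution solution_alt
  by_cases hn : n ≤ 1
  · rw [show PySem.List.pyRange (n - 1) 0 (-1) = [] from
        PySem.List.pyRange_neg_one_eq_nil (by omega),
      show PySem.List.pyRange 1 n 1 = [] from PySem.List.pyRange_one_eq_nil (by omega)]
    simp [pvScan2]
  · have hn2 : 2 ≤ n := by omega
    have hnlen : n ≤ (a.length : Int) := by
      rcases hnbound with h | h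
      · exact h
      · omega
    have hb : PySem.List.slice a none (some n) = a.take n.toNat :=
      PySem.List.slice_to a (show (0:Int) ≤ n by omega)
    rw [hb]
    simp only [pass1_eq, List.nil_append, pass2_eq, scan2_eq]
    set PRE : List Int := List.map
        (fun k => (List.foldl (pvStep (a.length + 1)) ((fun _ => false), (0:Int))
          (List.take (k + 1) a)).2) (List.range a.length) with hPREdef
    rw [lastmatch_eq (fun x => PySem.List.pyGetD PRE (x - 1) 0)]
    rw [trace_desc_int (a.length + 1) (fun i => PySem.List.pyGetD a i 0) (n - 1) 0 (by omega)
        ((fun _ => false), 0)]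
    have hrev : (PySem.List.pyRange (n - 1) 0 (-1)).reverse = PySem.List.pyRange 1 n 1 := by
      rw [PySem.List.pyRange_neg_one_eq_reverse, show (0:Int) + 1 = 1 from rfl,
        show n - 1 + 1 = n from by ring, List.reverse_reverse]
    rw [← hrev, ← List.map_reverse, hrev, List.find?_map]
    simp only [Option.map_map, Function.comp_def]
    have hmapid : ∀ o : Option Int, Option.map (fun x : Int => x) o = o := fun o => by
      cases o <;> rfl
    rw [hmapid]
    set bb := List.take n.toNat a with hbb
    set M : Int := ((bb.length : Nat) : Int) with hM
    have hMn : M = n := by rw [hM, hbb]; simp; omega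
    have hcells_len : ((pvCells bb).length : Int) = M := by rw [hM]; simp [pvCells]
    have hfs := first_spec bb M hM
    have hls := last_spec bb M hM
    congr 1
    apply find?_congr'
    intro i hi
    obtain ⟨h1i, h2i⟩ := PySem.List.mem_pyRange_one.mp hi
    -- A's running suffix mex equals the mex of the dropped cell list
    have hAfold : (List.foldl (pvStep (a.length + 1)) ((fun _ => false), (0:Int))
        (List.map (fun j => PySem.List.pyGetD a j 0)
          (PySem.List.pyRange (n - 1) (i - 1) (-1)))).2
        = pvMex (pvCells (bb.drop i.toNat)) := by
      have hlen : ((List.map (fun j => PySem.List.pyGetD a j 0)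
          (PySem.List.pyRange (n - 1) (i - 1) (-1))).length : Int) ≤ ((a.length + 1 : Nat) : Int) := by
        rw [List.length_map]
        have := PySem.List.length_pyRange_neg_one (a := n - 1) (b := i - 1)
        omega
      rw [foldA _ _ hlen]
      have hrev2 : PySem.List.pyRange (n - 1) (i - 1) (-1) = (PySem.List.pyRange i n 1).reverse := by
        rw [PySem.List.pyRange_neg_one_eq_reverse, show i - 1 + 1 = i from by ring,
          show n - 1 + 1 = n from by ring]
      show pvMex _ = pvMex _
      apply pvMex_congr
      intro j
      rw [hrev2, List.map_reverse, map_getD_range_seg a i n (by omega) (by omega) hnlen, ← hbb]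
      simp only [pvCells, List.mem_map, List.mem_reverse]
    -- A's stored prefix mex equals the mex of the taken cell list
    have hPREval : PySem.List.pyGetD PRE (i - 1) 0 = pvMex (pvCells (a.take i.toNat)) := by
      rw [show i - 1 = (((i - 1).toNat : Nat) : Int) from by omega, PySem.List.pyGetD_natCast,
        hPREdef]
      rw [List.getD_eq_getElem _ _ (by simp; omega)]
      simp only [List.getElem_map, List.getElem_range]
      rw [foldA _ _ (by rw [List.length_take]; push_cast; omega)]
      rw [show (i - 1).toNat + 1 = i.toNat from by omega]
    -- B's suffix table entry
    have hBsuf : pvFillSuf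
        (List.foldl (fun f i => pvUpd f (PySem.List.pyGetD bb i 0) i) (fun _ => -1)
          (PySem.List.pyRange 0 M 1)) M (bb.length + 1) (fun _ => 0) (M - 1) 0 i
        = pvMex (pvCells (bb.drop i.toNat)) := by
      apply fillSuf_correct bb _ M (fun u hu t => ((hls u hu).2.2 t)) (fun u hu => (hls u hu).1)
        (bb.length + 1) _ _ _ (by omega) (le_refl _) (le_refl _)
        (fun u hu hlt => absurd hlt (by omega)) (fun k hk1 hk2 => absurd hk2 (by omega))
        (by have := pvMex_le_length (pvCells bb); omega) i (by omega) (by omega)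
    -- B's prefix table entry
    have hBpre : pvFillPre
        (List.foldl (fun f i => pvUpd f (PySem.List.pyGetD bb i 0) i) (fun _ => M)
          (PySem.List.pyRange (M - 1) (-1) (-1))) M (bb.length + 1) (fun _ => 0) 0 0 (i - 1)
        = pvMex (pvCells (a.take i.toNat)) := by
      have h := fillPre_correct bb _ M hM (fun u hu t ht => ((hfs u hu).2.2 t ht))
        (fun u hu => (hfs u hu).2.1) (bb.length + 1) (fun _ => 0) 0 0 (le_refl 0)
        (by omega) (le_refl 0) (fun u hu hlt => absurd hlt (by omega))
        (fun j hj1 hj2 => absurd hj2 (by omega))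
        (by have := pvMex_le_length (pvCells bb); omega) (i - 1) (by omega) (by omega)
      rw [h, show i - 1 + 1 = i from by ring, hbb, List.take_take,
        show min i.toNat n.toNat = i.toNat from by omega]
    rw [hAfold, hPREval, hBsuf, hBpre]

-- ===== VERDICT (by name: the statement is the Claim_ definition above) =====
theorem solution_spec : Claim_equal_solution := by
  intro a n _hDom hPre
  unfold Spec_solution
  exact solution_main a n hPre
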